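-- pv_equiv track=rewrite | github.com/sankhadip10/scaler_problems | advance_2/binary_search_2/special_integer.py | checkwindow
-- ===== SOURCE A (Python) =====
-- def checkwindow(A, B, mid):
--     sum_val = 0
--     for i in range(mid):
--         sum_val += A[i]
--
--     max_sum = sum_val
--     for i in range(mid, len(A)):
--         sum_val = sum_val + A[i] - A[i - mid]
--         max_sum = max(max_sum, sum_val)
--     return max_sum <= B
-- ===== SOURCE B (Python) =====
-- def checkwindow(A, B, mid):
--     prefix = [0]
--     for x in A:
--         prefix.append(prefix[-1] + x)
--     best = prefix[mid] - prefix[0]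
--     for i in range(1, len(A) - mid + 1):
--         best = max(best, prefix[i + mid] - prefix[i])
--     return best <= B
-- ===== Notes on version B (the rewrite author's own statement) =====
-- stated objective: alternative
-- what changed: Replaces the incremental sliding-window sum (add entering element, subtract leaving one) with a precomputed prefix-sum table, taking each window sum as a difference of two prefix sums.
import Mathlib
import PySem

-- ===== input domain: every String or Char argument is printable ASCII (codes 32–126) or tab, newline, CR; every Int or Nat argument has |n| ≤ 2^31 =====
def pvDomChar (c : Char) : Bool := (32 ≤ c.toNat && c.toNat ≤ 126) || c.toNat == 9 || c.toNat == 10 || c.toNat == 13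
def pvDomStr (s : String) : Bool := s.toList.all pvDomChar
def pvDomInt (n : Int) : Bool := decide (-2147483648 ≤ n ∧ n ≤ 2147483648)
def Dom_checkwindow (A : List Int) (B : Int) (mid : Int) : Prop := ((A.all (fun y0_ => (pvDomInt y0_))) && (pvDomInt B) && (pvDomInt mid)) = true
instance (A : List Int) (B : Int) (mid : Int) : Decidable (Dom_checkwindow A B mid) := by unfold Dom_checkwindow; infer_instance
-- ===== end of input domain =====

-- B replaces A's incremental sliding-window sum by a prefix-sum table (window sum = difference of two prefix sums); an alternative algorithm of the same cost.

-- ===== PORT A =====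
def checkwindow (A : List Int) (B : Int) (mid : Int) : Bool :=
  let sum0 : Int :=
    (PySem.List.pyRange 0 mid 1).foldl (fun s i => s + PySem.List.pyGetD A i 0) 0
  let st :=
    (PySem.List.pyRange mid (A.length : Int) 1).foldl
      (fun (p : Int × Int) i =>
        let s := p.1 + PySem.List.pyGetD A i 0 - PySem.List.pyGetD A (i - mid) 0
        (s, max p.2 s))
      (sum0, sum0)
  decide (st.2 ≤ B)

-- ===== PORT B =====
def checkwindow_alt (A : List Int) (B : Int) (mid : Int) : Bool :=
  let pref : List Int :=
    A.foldl (fun acc x => acc ++ [PySem.List.pyGetD acc (-1) 0 + x]) [0]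
  let best0 : Int := PySem.List.pyGetD pref mid 0 - PySem.List.pyGetD pref 0 0
  let best :=
    (PySem.List.pyRange 1 ((A.length : Int) - mid + 1) 1).foldl
      (fun b i => max b (PySem.List.pyGetD pref (i + mid) 0 - PySem.List.pyGetD pref i 0))
      best0
  decide (best ≤ B)

-- ===== PRECONDITION & SPEC =====
-- Pre_ excludes exactly the inputs where the Python A raises IndexError (mid < 0 or mid > len(A)).
def Pre_checkwindow (A : List Int) (B : Int) (mid : Int) : Prop :=
  0 ≤ mid ∧ mid ≤ (A.length : Int)
instance (A : List Int) (B : Int) (mid : Int) : Decidable (Pre_checkwindow A B mid) := by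
  unfold Pre_checkwindow; infer_instance

def pvWitness_checkwindow : List Int × Int × Int := ([1, 2, 3], 3, 2)

def Spec_checkwindow (A : List Int) (B : Int) (mid : Int) (out : Bool) : Prop := out = checkwindow_alt A B mid
instance (A : List Int) (B : Int) (mid : Int) (out : Bool) : Decidable (Spec_checkwindow A B mid out) := by unfold Spec_checkwindow; infer_instance

-- ===== CLAIM (what is proved, stated in full; the proofs are below) =====
def Claim_equal_checkwindow : Prop := ∀ (A : List Int) (B : Int) (mid : Int), Dom_checkwindow A B mid → Pre_checkwindow A B mid → Spec_checkwindow A B mid (checkwindow A B mid)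

-- ===== LEMMAS AND PROOFS =====

-- common shape of both main loops: running max, over a list of window-start indices, of the window sum expressed by prefix sums
def mfold (A : List Int) (m : Nat) (l : List Nat) (acc : Int) : Int :=
  l.foldl (fun b j => max b (((A.take (j + m)).sum - (A.take j).sum))) acc

-- A[i] is the difference of consecutive prefix sums
theorem getD_take_diff (A : List Int) (i : Nat) (hi : i < A.length) :
    PySem.List.pyGetD A (i : Int) 0 = (A.take (i + 1)).sum - (A.take i).sum := by
  rw [PySem.List.pyGetD_natCast, List.take_add_one]
  simp [hi]

-- A's first loop computes a difference of prefix sums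
theorem loop1_eq (A : List Int) : ∀ (c : Nat) (a : Nat) (s0 : Int), a + c ≤ A.length →
    (PySem.List.pyRange (a : Int) ((a : Int) + (c : Int)) 1).foldl
        (fun s i => s + PySem.List.pyGetD A i 0) s0
      = s0 + ((A.take (a + c)).sum - (A.take a).sum) := by
  intro c
  induction c with
  | zero => intro a s0 h; simp [PySem.List.pyRange_one_eq_nil]
  | succ c ih =>
    intro a s0 h
    have h1 : ((a:Int)) ≤ (a:Int) + c := by omega
    have : ((a : Int) + ((c+1 : Nat) : Int)) = ((a:Int) + c) + 1 := by push_cast; ring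
    rw [this, PySem.List.pyRange_one_succ_right h1, List.foldl_append]
    rw [ih a s0 (by omega)]
    have hc : ((a:Int) + (c:Int)) = ((a + c : Nat) : Int) := by push_cast; ring
    simp only [List.foldl_cons, List.foldl_nil, hc]
    rw [getD_take_diff A (a+c) (by omega)]
    have : a + (c+1) = (a + c) + 1 := by omega
    rw [this]; ring

-- invariant of A's second loop: the running sum is a prefix-sum difference, the running max is mfold
theorem loop2_eq (A : List Int) (m : Nat) : ∀ (c k : Nat) (acc : Int), m ≤ k → k + c ≤ A.length →
    ((PySem.List.pyRange (k : Int) ((k : Int) + (c : Int)) 1).foldl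
        (fun (p : Int × Int) i =>
          let s := p.1 + PySem.List.pyGetD A i 0 - PySem.List.pyGetD A (i - (m : Int)) 0
          (s, max p.2 s))
        ((A.take k).sum - (A.take (k - m)).sum, acc))
      = ((A.take (k + c)).sum - (A.take (k + c - m)).sum,
         mfold A m (List.range' (k - m + 1) c) acc) := by
  intro c
  induction c with
  | zero => intro k acc hm h; simp [PySem.List.pyRange_one_eq_nil, mfold]
  | succ c ih =>
    intro k acc hm h
    have hlt : (k:Int) < (k:Int) + ((c+1 : Nat) : Int) := by push_cast; omega
    rw [PySem.List.pyRange_one_cons hlt, List.foldl_cons]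
    have hkm : (k:Int) - (m:Int) = ((k - m : Nat) : Int) := by push_cast [hm]; ring
    simp only [hkm]
    rw [getD_take_diff A k (by omega), getD_take_diff A (k-m) (by omega)]
    have hs : (A.take k).sum - (A.take (k - m)).sum +
        ((A.take (k+1)).sum - (A.take k).sum) - ((A.take (k-m+1)).sum - (A.take (k-m)).sum)
        = (A.take (k+1)).sum - (A.take ((k+1) - m)).sum := by
      have : (k+1) - m = (k-m) + 1 := by omega
      rw [this]; ring
    have hcast : (k:Int) + 1 = ((k+1 : Nat) : Int) := by push_cast; ring
    have hcast2 : (k:Int) + ((c+1 : Nat) : Int) = ((k+1 : Nat) : Int) + (c : Nat) := by push_cast; ring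
    simp only [hs, hcast, hcast2]
    rw [ih (k+1) (max acc ((A.take (k+1)).sum - (A.take ((k+1)-m)).sum)) (by omega) (by omega)]
    have h1 : k + 1 + c = k + (c+1) := by omega
    have h2 : (k+1) - m = (k - m) + 1 := by omega
    rw [h1, h2]
    congr 1
    have h3 : k - m + 1 + m = k + 1 := by omega
    simp only [mfold, List.range'_succ, List.foldl_cons, h3]

-- B's prefix list is the table of prefix sums
theorem pref_eq (A : List Int) :
    A.foldl (fun acc x => acc ++ [PySem.List.pyGetD acc (-1) 0 + x]) [0]
      = (List.range (A.length + 1)).map (fun j => (A.take j).sum) := by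
  induction A using List.reverseRecOn with
  | nil => simp
  | append_singleton as x ih =>
    rw [List.foldl_append, ih, List.foldl_cons, List.foldl_nil]
    have hsplit : (List.range (as.length + 1)).map (fun j => (as.take j).sum)
        = (List.range as.length).map (fun j => (as.take j).sum) ++ [as.sum] := by
      rw [List.range_succ, List.map_append]
      simp
    rw [hsplit, PySem.List.pyGetD_neg_one_append_singleton]
    have hlen : (as ++ [x]).length + 1 = (as.length + 1) + 1 := by simp
    rw [hlen, List.range_succ, List.map_append]
    congr 1
    · rw [← hsplit]
      apply List.map_congr_left
      intro j hj
      rw [List.mem_range] at hj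
      rw [List.take_append_of_le_length (by omega)]
    · simp

theorem pref_lookup (A : List Int) (j : Nat) (hj : j ≤ A.length) :
    PySem.List.pyGetD
        ((List.range (A.length + 1)).map (fun j => (A.take j).sum)) (j : Int) 0
      = (A.take j).sum := by
  rw [PySem.List.pyGetD_natCast]
  rw [List.getD_eq_getElem?_getD, List.getElem?_map]
  simp [List.getElem?_range (by omega : j < A.length + 1)]

-- B's loop is mfold over the same window starts
theorem loopB_eq (A : List Int) (m : Nat) : ∀ (c a : Nat) (acc : Int), a + c + m ≤ A.length + 1 →
    ((PySem.List.pyRange (a : Int) ((a : Int) + (c : Int)) 1).foldl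
        (fun b i => max b (PySem.List.pyGetD ((List.range (A.length + 1)).map (fun j => (A.take j).sum)) (i + (m : Int)) 0
                            - PySem.List.pyGetD ((List.range (A.length + 1)).map (fun j => (A.take j).sum)) i 0))
        acc)
      = mfold A m (List.range' a c) acc := by
  intro c
  induction c with
  | zero => intro a acc h; simp [PySem.List.pyRange_one_eq_nil, mfold]
  | succ c ih =>
    intro a acc h
    have hlt : (a:Int) < (a:Int) + ((c+1 : Nat) : Int) := by push_cast; omega
    rw [PySem.List.pyRange_one_cons hlt, List.foldl_cons]
    have hcast : (a:Int) + (m:Int) = ((a + m : Nat) : Int) := by push_cast; ring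
    rw [hcast, pref_lookup A (a+m) (by omega), pref_lookup A a (by omega)]
    have hcast2 : (a:Int) + ((c+1 : Nat) : Int) = ((a+1 : Nat) : Int) + (c : Nat) := by push_cast; ring
    have hcast3 : (a:Int) + 1 = ((a+1 : Nat) : Int) := by push_cast; ring
    rw [hcast2, hcast3, ih (a+1) _ (by omega)]
    simp only [mfold, List.range'_succ, List.foldl_cons]

theorem main_eq (A : List Int) (B : Int) (mid : Int) (h0 : 0 ≤ mid) (hle : mid ≤ (A.length : Int)) :
    checkwindow A B mid = checkwindow_alt A B mid := by
  obtain ⟨m, rfl⟩ : ∃ m : Nat, mid = (m:Int) := ⟨mid.toNat, (Int.toNat_of_nonneg h0).symm⟩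
  have hm : m ≤ A.length := by exact_mod_cast hle
  have hsum0 : (PySem.List.pyRange 0 (m:Int) 1).foldl (fun s i => s + PySem.List.pyGetD A i 0) 0
      = (A.take m).sum := by simpa using loop1_eq A m 0 0 (by omega)
  have hz := pref_lookup A 0 (Nat.zero_le _)
  simp only [Nat.cast_zero] at hz
  unfold checkwindow checkwindow_alt
  dsimp only
  rw [pref_eq, hsum0, pref_lookup A m hm, hz]
  simp only [List.take_zero, List.sum_nil, sub_zero]
  have hcastA : (A.length : Int) = (m:Int) + ((A.length - m : Nat) : Int) := by push_cast [hm]; ring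
  rw [hcastA]
  have hinit : ((A.take m).sum, (A.take m).sum)
      = ((A.take m).sum - (A.take (m - m)).sum, (A.take m).sum) := by simp
  rw [hinit, loop2_eq A m (A.length - m) m ((A.take m).sum) le_rfl (by omega)]
  rw [show ((m:Int) + ((A.length - m : Nat):Int)) - (m:Int) + 1
        = ((1:Nat):Int) + ((A.length - m : Nat):Int) from by push_cast; ring]
  have hB : ∀ acc : Int, _ := fun acc => loopB_eq A m (A.length - m) 1 acc (by omega)
  simp only [Nat.cast_one] at hB ⊢
  rw [hB]
  simp

-- ===== VERDICT (by name: the statement is the Claim_ definition above) =====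
theorem checkwindow_spec : Claim_equal_checkwindow := by
  intro A B mid _ hpre
  exact main_eq A B mid hpre.1 hpre.2
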